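-- pv_equiv track=rewrite | github.com/JunkerMeister/lab7 | test.py | find_max_substring_count
-- ===== SOURCE A (Python) =====
-- def find_max_substring_count(word):
--     max_count = 0
--     max_substring = ""
--
--     for i in range(len(word)):
--         for j in range(i+1, len(word)+1):
--             substring = word[i:j]
--             count = word.count(substring)
--             if count > max_count or (count >= max_count and len(substring) > len(max_substring)):
--                 max_count = count
--                 max_substring = substring
--
--     return max_count, max_substring
-- ===== SOURCE B (Python) =====
-- def find_max_substring_count(word):
--     # max achievable count is the max character frequency (non-overlapping
--     # occurrences of s are disjoint and each contains s[0]); then return the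
--     # longest (leftmost on ties) substring attaining it.
--     if not word:
--         return 0, ""
--     best = max(map(word.count, word))
--     n = len(word)
--     for length in range(n, 0, -1):
--         for i in range(n - length + 1):
--             sub = word[i:i + length]
--             if word.count(sub) == best:
--                 return best, sub
-- ===== Notes on version B (the rewrite author's own statement) =====
-- stated objective: alternative
-- what changed: B replaces A's full scan that tracks a running (count,length) maximum over all O(n^2) substrings by first computing the maximum achievable count in closed form (the maximum character frequency, since non-overlapping occurrences each consume a copy of the first character) and then returning the first substring attaining it when scanning lengths from longest to shortest, exiting early.
import Mathlib
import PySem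

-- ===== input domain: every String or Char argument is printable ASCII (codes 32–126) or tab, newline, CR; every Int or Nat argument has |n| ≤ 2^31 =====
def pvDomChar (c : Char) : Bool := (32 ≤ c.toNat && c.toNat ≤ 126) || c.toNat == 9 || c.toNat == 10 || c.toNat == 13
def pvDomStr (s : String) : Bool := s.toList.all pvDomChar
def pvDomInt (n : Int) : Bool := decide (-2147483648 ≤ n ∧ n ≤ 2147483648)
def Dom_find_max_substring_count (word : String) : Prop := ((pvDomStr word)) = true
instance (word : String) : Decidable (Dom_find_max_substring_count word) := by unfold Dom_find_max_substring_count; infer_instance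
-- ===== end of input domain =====

-- B computes the optimal count in closed form (the maximum character frequency) and returns the
-- first substring attaining it scanning lengths longest-to-shortest; A scans all substrings
-- keeping a running (count, length) maximum. Equal return values on every input are proved.

-- ===== PORT A =====
def find_max_substring_count (word : String) : Int × String :=
  let cs := word.toList
  let n : Nat := cs.length
  let st := (PySem.List.pyRange 0 (n : Int)).foldl (fun st i =>
      (PySem.List.pyRange (i + 1) ((n : Int) + 1)).foldl (fun st j =>
        let substring := PySem.List.slice cs (some i) (some j)
        let count : Int := (PySem.Chars.count cs substring : Int)
        if count > st.1 ∨ (count ≥ st.1 ∧ substring.length > st.2.length) then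
          (count, substring)
        else st) st)
    ((0 : Int), ([] : List Char))
  (st.1, String.ofList st.2)

-- ===== PORT B =====
-- inner 'for i in range(n - length + 1)' with early return (rem = iterations left)
def pvAltRow (cs : List Char) (best L : Nat) : Nat → Nat → Option (List Char)
  | 0, _ => none
  | rem + 1, i =>
    let sub := (cs.drop i).take L
    if PySem.Chars.count cs sub = best then some sub else pvAltRow cs best L rem (i + 1)

-- outer 'for length in range(n, 0, -1)' with early return
def pvAltDown (cs : List Char) (best : Nat) : Nat → Option (List Char)
  | 0 => none
  | L + 1 =>
    match pvAltRow cs best (L + 1) (cs.length - (L + 1) + 1) 0 with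
    | some s => some s
    | none => pvAltDown cs best L

def find_max_substring_count_alt (word : String) : Int × String :=
  let cs := word.toList
  if cs.isEmpty then (0, "")
  else
    let best : Nat := (PySem.List.max? (cs.map fun c => PySem.Chars.count cs [c]) id).getD 0
    match pvAltDown cs best cs.length with
    | some s => ((best : Int), String.ofList s)
    | none => ((best : Int), "")   -- not reached: a most frequent single character attains best

-- ===== PRECONDITION & SPEC =====
def Spec_find_max_substring_count (word : String) (out : Int × String) : Prop := out = find_max_substring_count_alt word
instance (word : String) (out : Int × String) : Decidable (Spec_find_max_substring_count word out) := by unfold Spec_find_max_substring_count; infer_instance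

-- ===== CLAIM (what is proved, stated in full; the proofs are below) =====
def Claim_equal_find_max_substring_count : Prop := ∀ (word : String), Dom_find_max_substring_count word → Spec_find_max_substring_count word (find_max_substring_count word)

-- ===== LEMMAS AND PROOFS =====

-- the substring of cs starting at i of length L (Python word[i:j] with L = j - i)
def pvSub (cs : List Char) (i L : Nat) : List Char := (cs.drop i).take L

-- the closed-form maximum count B computes
def pvF (cs : List Char) : Nat := (PySem.List.max? (cs.map fun c => PySem.Chars.count cs [c]) id).getD 0

-- "row L has a hit at i"
-- "row L has a hit at i" (abbrev: keeps decidability synthesis automatic)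
abbrev pvHit (cs : List Char) (L i : Nat) : Prop :=
  i ≤ cs.length - L ∧ PySem.Chars.count cs (pvSub cs i L) = pvF cs

abbrev pvP (cs : List Char) (L : Nat) : Prop := ∃ i < cs.length + 1, pvHit cs L i

-- the length of the answer: greatest L with a hit
def pvLstar (cs : List Char) : Nat := Nat.findGreatest (pvP cs) cs.length

-- the leftmost hit at the answer length
def pvIstar (cs : List Char) : Nat :=
  if h : pvP cs (pvLstar cs) then
    Nat.find (p := fun i => pvHit cs (pvLstar cs) i) ⟨h.choose, h.choose_spec.2⟩
  else 0

-- the answer substring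
def pvW (cs : List Char) : List Char := pvSub cs (pvIstar cs) (pvLstar cs)

-- A's fold step, once the ranges are bridged to Nat lists
def pvStep (cs : List Char) (st : Int × List Char) (s : List Char) : Int × List Char :=
  if (PySem.Chars.count cs s : Int) > st.1 ∨
      ((PySem.Chars.count cs s : Int) ≥ st.1 ∧ s.length > st.2.length) then
    ((PySem.Chars.count cs s : Int), s)
  else st

-- A's double loop as a single value (definitionally the body of the port)
def pvAfold (cs : List Char) : Int × List Char :=
  (PySem.List.pyRange 0 (cs.length : Int)).foldl (fun st i =>
      (PySem.List.pyRange (i + 1) ((cs.length : Int) + 1)).foldl (fun st j =>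
        let substring := PySem.List.slice cs (some i) (some j)
        let count : Int := (PySem.Chars.count cs substring : Int)
        if count > st.1 ∨ (count ≥ st.1 ∧ substring.length > st.2.length) then
          (count, substring)
        else st) st)
    ((0 : Int), ([] : List Char))

theorem pv_A_def (word : String) :
    find_max_substring_count word
      = ((pvAfold word.toList).1, String.ofList (pvAfold word.toList).2) := rfl

-- unfolding equations for B's loops
theorem pvAltRow_succ (cs : List Char) (b L rem i : Nat) :
    pvAltRow cs b L (rem + 1) i
      = if PySem.Chars.count cs (pvSub cs i L) = b then some (pvSub cs i L)
        else pvAltRow cs b L rem (i + 1) := rfl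

theorem pvAltDown_succ (cs : List Char) (b L : Nat) :
    pvAltDown cs b (L + 1)
      = match pvAltRow cs b (L + 1) (cs.length - (L + 1) + 1) 0 with
        | some s => some s
        | none => pvAltDown cs b L := rfl

-- ---- counting lemmas ----

theorem pv_go_single (c : Char) : ∀ (fuel : Nat) (l : List Char) (acc : Nat),
    l.length ≤ fuel → PySem.Chars.count.go [c] fuel l acc = acc + l.count c := by
  intro fuel
  induction fuel with
  | zero =>
    intro l acc h
    have hl : l = [] := List.eq_nil_of_length_eq_zero (Nat.le_zero.mp h)
    subst hl
    simp [PySem.Chars.count.go]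
  | succ fuel ih =>
    intro l acc h
    cases l with
    | nil => simp [PySem.Chars.count.go]
    | cons x t =>
      have ht : t.length ≤ fuel := by
        simp only [List.length_cons] at h
        omega
      by_cases hcx : c = x
      · subst hcx
        have hp : List.isPrefixOf [c] (c :: t) = true := by simp [List.isPrefixOf]
        simp only [PySem.Chars.count.go, hp, if_true]
        have hd : List.drop (List.length [c]) (c :: t) = t := by simp
        rw [hd, ih t (acc + 1) ht]
        simp
        omega
      · have hp : List.isPrefixOf [c] (x :: t) = false := by
          simp [List.isPrefixOf]
          intro hh
          exact absurd hh hcx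
        simp only [PySem.Chars.count.go, hp, Bool.false_eq_true, if_false]
        rw [ih t acc ht]
        simp [List.count_cons]
        exact fun hh => hcx hh.symm

theorem pv_count_single (cs : List Char) (c : Char) :
    PySem.Chars.count cs [c] = cs.count c := by
  unfold PySem.Chars.count
  simp only [List.isEmpty_cons, Bool.false_eq_true, if_false]
  rw [pv_go_single c cs.length cs 0 le_rfl]
  simp

theorem pv_go_le (c : Char) (t : List Char) : ∀ (fuel : Nat) (l : List Char) (acc : Nat),
    PySem.Chars.count.go (c :: t) fuel l acc ≤ acc + l.count c := by
  intro fuel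
  induction fuel with
  | zero => intro l acc; simp [PySem.Chars.count.go]
  | succ fuel ih =>
    intro l acc
    cases l with
    | nil => simp [PySem.Chars.count.go]
    | cons x t' =>
      cases hp : List.isPrefixOf (c :: t) (x :: t') with
      | true =>
        simp only [PySem.Chars.count.go, hp, if_true]
        obtain ⟨r, hr⟩ := List.isPrefixOf_iff_prefix.mp hp
        have hdrop : List.drop (List.length (c :: t)) (x :: t') = r := by
          rw [← hr, List.drop_left]
        rw [hdrop]
        have h1 := ih r (acc + 1)
        have h2 : (x :: t').count c = ((c :: t) ++ r).count c := by rw [hr]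
        have h3 : ((c :: t) ++ r).count c = (c :: t).count c + r.count c := by
          simp [List.count_append]
          omega
        have h4 : 1 ≤ (c :: t).count c := by simp
        omega
      | false =>
        simp only [PySem.Chars.count.go, hp, Bool.false_eq_true, if_false]
        have h1 := ih t' acc
        have h2 : t'.count c ≤ (x :: t').count c := by
          simp [List.count_cons]
        omega

theorem pv_count_le_head (cs : List Char) (c : Char) (t : List Char) :
    PySem.Chars.count cs (c :: t) ≤ cs.count c := by
  unfold PySem.Chars.count
  simp only [List.isEmpty_cons, Bool.false_eq_true, if_false]
  have := pv_go_le c t cs.length cs 0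
  omega

-- ---- facts about pvF ----

-- the fold step of Python's max (first extremal kept)
def pvMaxStep : Option Nat → Nat → Option Nat := fun acc x =>
  match acc with
  | none => some x
  | some m => if id m < id x then some x else some m

theorem pv_max?_def (xs : List Nat) : PySem.List.max? xs id = xs.foldl pvMaxStep none := by
  unfold PySem.List.max?
  apply PySem.List.foldl_congr_mem
  intro acc x _
  cases acc <;> rfl

theorem pv_max?_aux : ∀ (xs : List Nat) (a : Nat),
    ∃ m, List.foldl pvMaxStep (some a) xs = some m ∧ (m = a ∨ m ∈ xs) := by
  intro xs
  induction xs with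
  | nil => intro a; exact ⟨a, rfl, Or.inl rfl⟩
  | cons x xs ih =>
    intro a
    rw [List.foldl_cons]
    by_cases hax : a < x
    · obtain ⟨m, hm, hmem⟩ := ih x
      have hstep : pvMaxStep (some a) x = some x := by simp [pvMaxStep, hax]
      rw [hstep]
      refine ⟨m, hm, Or.inr ?_⟩
      rcases hmem with h | h
      · simp [h]
      · simp [h]
    · obtain ⟨m, hm, hmem⟩ := ih a
      have hstep : pvMaxStep (some a) x = some a := by simp [pvMaxStep, hax]
      rw [hstep]
      refine ⟨m, hm, ?_⟩
      rcases hmem with h | h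
      · exact Or.inl h
      · exact Or.inr (by simp [h])

theorem pv_max?_spec (xs : List Nat) (hne : xs ≠ []) :
    ∃ m ∈ xs, PySem.List.max? xs id = some m := by
  cases xs with
  | nil => exact absurd rfl hne
  | cons x xs =>
    obtain ⟨m, hm, hmem⟩ := pv_max?_aux xs x
    refine ⟨m, ?_, ?_⟩
    · rcases hmem with h | h
      · simp [h]
      · simp [h]
    · rw [pv_max?_def, List.foldl_cons]
      exact hm

theorem pv_f_eq (cs : List Char) (hne : cs ≠ []) :
    ∃ m ∈ (cs.map fun c => PySem.Chars.count cs [c]),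
      PySem.List.max? (cs.map fun c => PySem.Chars.count cs [c]) id = some m ∧ pvF cs = m := by
  obtain ⟨m, hmem, hm⟩ := pv_max?_spec (cs.map fun c => PySem.Chars.count cs [c])
    (by simpa using hne)
  exact ⟨m, hmem, hm, by simp [pvF, hm]⟩

theorem pv_f_le (cs : List Char) (hne : cs ≠ []) (c : Char) (hc : c ∈ cs) :
    cs.count c ≤ pvF cs := by
  obtain ⟨m, hmem, hm, hfm⟩ := pv_f_eq cs hne
  have h := PySem.List.max?_isMax hm (PySem.Chars.count cs [c]) (List.mem_map_of_mem hc)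
  rw [pv_count_single] at h
  simpa [hfm] using h

theorem pv_f_attained (cs : List Char) (hne : cs ≠ []) : ∃ c ∈ cs, cs.count c = pvF cs := by
  obtain ⟨m, hmem, hm, hfm⟩ := pv_f_eq cs hne
  obtain ⟨c, hc, hcm⟩ := List.mem_map.mp hmem
  exact ⟨c, hc, by rw [← pv_count_single cs c, hcm, hfm]⟩

theorem pv_f_pos (cs : List Char) (hne : cs ≠ []) : 0 < pvF cs := by
  obtain ⟨c, hc, hcf⟩ := pv_f_attained cs hne
  have : 0 < cs.count c := List.count_pos_iff.mpr hc
  omega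

-- a nonempty pvSub starts with the character at its start index
theorem pv_sub_cons (cs : List Char) (i L : Nat) (hL : 0 < L) (hi : i < cs.length) :
    pvSub cs i L = cs[i] :: (cs.drop (i + 1)).take (L - 1) := by
  obtain ⟨L', rfl⟩ := Nat.exists_eq_add_of_lt hL
  unfold pvSub
  simp only [Nat.zero_add, Nat.add_sub_cancel]
  rw [List.drop_eq_getElem_cons hi, List.take_succ_cons]

theorem pv_count_sub_le (cs : List Char) (hne : cs ≠ []) (i L : Nat) (hL : 0 < L)
    (hi : i < cs.length) : PySem.Chars.count cs (pvSub cs i L) ≤ pvF cs := by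
  rw [pv_sub_cons cs i L hL hi]
  calc PySem.Chars.count cs (cs[i] :: (cs.drop (i + 1)).take (L - 1))
      ≤ cs.count cs[i] := pv_count_le_head _ _ _
    _ ≤ pvF cs := pv_f_le cs hne cs[i] (List.getElem_mem hi)

theorem pv_sub_length (cs : List Char) (i L : Nat) (h : i + L ≤ cs.length) :
    (pvSub cs i L).length = L := by
  unfold pvSub
  simp
  omega

-- ---- facts about pvLstar, pvIstar ----

theorem pv_P_one (cs : List Char) (hne : cs ≠ []) : pvP cs 1 := by
  obtain ⟨c, hc, hcf⟩ := pv_f_attained cs hne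
  obtain ⟨ic, hic, hgc⟩ := List.mem_iff_getElem.mp hc
  refine ⟨ic, by omega, by omega, ?_⟩
  rw [pv_sub_cons cs ic 1 one_pos hic]
  have h0 : (1 : Nat) - 1 = 0 := rfl
  rw [h0, List.take_zero, hgc, pv_count_single]
  exact hcf

theorem pv_len_pos (cs : List Char) (hne : cs ≠ []) : 0 < cs.length :=
  List.length_pos_iff.mpr hne

theorem pv_Lstar_pos (cs : List Char) (hne : cs ≠ []) : 0 < pvLstar cs := by
  exact Nat.lt_of_lt_of_le one_pos (Nat.le_findGreatest (pv_len_pos cs hne) (pv_P_one cs hne))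

theorem pv_Lstar_le (cs : List Char) : pvLstar cs ≤ cs.length := by
  exact Nat.findGreatest_le _

theorem pv_P_Lstar (cs : List Char) (hne : cs ≠ []) : pvP cs (pvLstar cs) := by
  exact Nat.findGreatest_spec (pv_len_pos cs hne) (pv_P_one cs hne)

theorem pv_Istar_hit (cs : List Char) (hne : cs ≠ []) : pvHit cs (pvLstar cs) (pvIstar cs) := by
  unfold pvIstar
  rw [dif_pos (pv_P_Lstar cs hne)]
  exact Nat.find_spec _

theorem pv_Istar_min (cs : List Char) (hne : cs ≠ []) (k : Nat) (hk : k < pvIstar cs) :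
    ¬ pvHit cs (pvLstar cs) k := by
  unfold pvIstar at hk
  rw [dif_pos (pv_P_Lstar cs hne)] at hk
  exact Nat.find_min _ hk

-- a hit at length L forces L ≤ pvLstar
theorem pv_le_Lstar (cs : List Char) (i L : Nat) (hL : 0 < L) (hiL : i + L ≤ cs.length)
    (hf : PySem.Chars.count cs (pvSub cs i L) = pvF cs) : L ≤ pvLstar cs := by
  by_contra hgt
  have hgt' : pvLstar cs < L := by omega
  have hLn : L ≤ cs.length := by omega
  exact Nat.findGreatest_is_greatest hgt' hLn ⟨i, by omega, by omega, hf⟩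

theorem pv_Istar_add_Lstar_le (cs : List Char) (hne : cs ≠ []) :
    pvIstar cs + pvLstar cs ≤ cs.length := by
  have h := (pv_Istar_hit cs hne).1
  have := pv_Lstar_le cs
  omega

theorem pv_W_count (cs : List Char) (hne : cs ≠ []) :
    PySem.Chars.count cs (pvW cs) = pvF cs := (pv_Istar_hit cs hne).2

theorem pv_W_length (cs : List Char) (hne : cs ≠ []) : (pvW cs).length = pvLstar cs :=
  pv_sub_length cs _ _ (pv_Istar_add_Lstar_le cs hne)

-- ---- the fold characterisation ----

theorem pv_fold_mem (cs : List Char) : ∀ (l : List (List Char)) (st : Int × List Char),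
    List.foldl (pvStep cs) st l = st ∨
      ∃ s ∈ l, List.foldl (pvStep cs) st l = ((PySem.Chars.count cs s : Int), s) := by
  intro l
  induction l with
  | nil => intro st; exact Or.inl rfl
  | cons s l ih =>
    intro st
    rw [List.foldl_cons]
    rcases ih (pvStep cs st s) with h | ⟨s', hs', h⟩
    · rw [h]
      unfold pvStep
      split_ifs with hc
      · exact Or.inr ⟨s, List.mem_cons_self, rfl⟩
      · exact Or.inl rfl
    · exact Or.inr ⟨s', List.mem_cons_of_mem _ hs', h⟩

theorem pv_fold_const (cs : List Char) : ∀ (l : List (List Char)) (st : Int × List Char),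
    (∀ s ∈ l, ¬ ((PySem.Chars.count cs s : Int) > st.1 ∨
        ((PySem.Chars.count cs s : Int) ≥ st.1 ∧ s.length > st.2.length))) →
    List.foldl (pvStep cs) st l = st := by
  intro l
  induction l with
  | nil => intro st _; rfl
  | cons s l ih =>
    intro st h
    rw [List.foldl_cons]
    have hs : pvStep cs st s = st := by
      unfold pvStep
      rw [if_neg (h s List.mem_cons_self)]
    rw [hs]
    exact ih st (fun s' hs' => h s' (List.mem_cons_of_mem _ hs'))

theorem pv_fold_first (cs : List Char) (pre post : List (List Char)) (w : List Char)
    (h0 : 0 < PySem.Chars.count cs w)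
    (hpre : ∀ s ∈ pre, PySem.Chars.count cs s < PySem.Chars.count cs w ∨
        (PySem.Chars.count cs s = PySem.Chars.count cs w ∧ s.length < w.length))
    (hpost : ∀ s ∈ post, PySem.Chars.count cs s ≤ PySem.Chars.count cs w ∧
        (PySem.Chars.count cs s = PySem.Chars.count cs w → s.length ≤ w.length)) :
    List.foldl (pvStep cs) ((0 : Int), ([] : List Char)) (pre ++ w :: post)
      = ((PySem.Chars.count cs w : Int), w) := by
  rw [List.foldl_append, List.foldl_cons]
  have hcond : ∀ st : Int × List Char,
      (st = ((0 : Int), ([] : List Char)) ∨ ∃ s ∈ pre, st = ((PySem.Chars.count cs s : Int), s)) →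
      pvStep cs st w = ((PySem.Chars.count cs w : Int), w) := by
    intro st hst
    rcases hst with rfl | ⟨s, hs, rfl⟩
    · have hx : (((0 : Int), ([] : List Char)) : Int × List Char).1
          < (PySem.Chars.count cs w : Int) := by
        show (0 : Int) < (PySem.Chars.count cs w : Int)
        exact_mod_cast h0
      unfold pvStep
      rw [if_pos (Or.inl hx)]
    · rcases hpre s hs with h | ⟨h1, h2⟩
      · have hx : (((PySem.Chars.count cs s : Int), s) : Int × List Char).1
            < (PySem.Chars.count cs w : Int) := by
          show (PySem.Chars.count cs s : Int) < (PySem.Chars.count cs w : Int)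
          exact_mod_cast h
        unfold pvStep
        rw [if_pos (Or.inl hx)]
      · have hx1 : (((PySem.Chars.count cs s : Int), s) : Int × List Char).1
            ≤ (PySem.Chars.count cs w : Int) := by
          show (PySem.Chars.count cs s : Int) ≤ (PySem.Chars.count cs w : Int)
          exact_mod_cast Nat.le_of_eq h1
        have hx2 : w.length > (((PySem.Chars.count cs s : Int), s) : Int × List Char).2.length := h2
        unfold pvStep
        rw [if_pos (Or.inr ⟨hx1, hx2⟩)]
  have hst1 := pv_fold_mem cs pre ((0 : Int), ([] : List Char))
  have hw : pvStep cs (List.foldl (pvStep cs) ((0 : Int), ([] : List Char)) pre) w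
      = ((PySem.Chars.count cs w : Int), w) := by
    apply hcond
    rcases hst1 with h | ⟨s, hs, h⟩
    · exact Or.inl h
    · exact Or.inr ⟨s, hs, h⟩
  rw [hw]
  apply pv_fold_const
  intro s hs
  obtain ⟨h1, h2⟩ := hpost s hs
  intro hcon
  rcases hcon with hgt | ⟨hge, hlen⟩
  · have hgt' : (PySem.Chars.count cs w : Int) < (PySem.Chars.count cs s : Int) := hgt
    have : PySem.Chars.count cs w < PySem.Chars.count cs s := by exact_mod_cast hgt'
    omega
  · have hge' : (PySem.Chars.count cs w : Int) ≤ (PySem.Chars.count cs s : Int) := hge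
    have hle : PySem.Chars.count cs w ≤ PySem.Chars.count cs s := by exact_mod_cast hge'
    have heq : PySem.Chars.count cs s = PySem.Chars.count cs w := by omega
    have hlen2 := h2 heq
    have hlen' : w.length < s.length := hlen
    omega

-- ---- bridging pyRange to Nat ranges ----

theorem pv_pyRange_natCast : ∀ (d a : Nat),
    PySem.List.pyRange (a : Int) ((a + d : Nat) : Int)
      = (List.range' a d).map (Nat.cast : Nat → Int) := by
  intro d
  induction d with
  | zero =>
    intro a
    apply List.eq_nil_iff_forall_not_mem.mpr
    intro x hx
    rw [PySem.List.mem_pyRange_one] at hx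
    simp at hx
    omega
  | succ d ih =>
    intro a
    have hlt : (a : Int) < ((a + (d + 1) : Nat) : Int) := by push_cast; omega
    rw [PySem.List.pyRange_one_cons hlt]
    have h1 : ((a : Int) + 1) = ((a + 1 : Nat) : Int) := by push_cast; ring
    have h2 : ((a + (d + 1) : Nat) : Int) = (((a + 1) + d : Nat) : Int) := by push_cast; ring
    rw [h1, h2, ih (a + 1)]
    rw [List.range'_succ]
    simp

-- ---- B's search finds the canonical answer ----

theorem pv_row_none (cs : List Char) (L : Nat) (hnp : ¬ pvP cs L) :
    ∀ (rem i : Nat), i + rem ≤ cs.length - L + 1 →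
    pvAltRow cs (pvF cs) L rem i = none := by
  intro rem
  induction rem with
  | zero => intro i _; rfl
  | succ rem ih =>
    intro i hi
    rw [pvAltRow_succ, if_neg, ih (i + 1) (by omega)]
    intro hc
    exact hnp ⟨i, by omega, by omega, hc⟩

theorem pv_row_hit (cs : List Char) (hne : cs ≠ []) : ∀ (rem i : Nat), i ≤ pvIstar cs →
    pvIstar cs < i + rem → pvAltRow cs (pvF cs) (pvLstar cs) rem i = some (pvW cs) := by
  intro rem
  induction rem with
  | zero => intro i h1 h2; omega
  | succ rem ih =>
    intro i h1 h2
    rw [pvAltRow_succ]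
    by_cases hii : i = pvIstar cs
    · subst hii
      rw [show pvSub cs (pvIstar cs) (pvLstar cs) = pvW cs from rfl]
      rw [if_pos (pv_W_count cs hne)]
    · have hlt : i < pvIstar cs := by omega
      rw [if_neg, ih (i + 1) (by omega) (by omega)]
      intro hc
      have hin : i ≤ cs.length - pvLstar cs := by
        have := (pv_Istar_hit cs hne).1
        omega
      exact pv_Istar_min cs hne i hlt ⟨hin, hc⟩

theorem pv_down_eq (cs : List Char) (hne : cs ≠ []) : ∀ (L : Nat), pvLstar cs ≤ L →
    L ≤ cs.length → pvAltDown cs (pvF cs) L = some (pvW cs) := by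
  intro L
  induction L with
  | zero => intro h1 _; have := pv_Lstar_pos cs hne; omega
  | succ L ih =>
    intro h1 h2
    rw [pvAltDown_succ]
    by_cases hL : pvLstar cs = L + 1
    · rw [← hL]
      rw [pv_row_hit cs hne (cs.length - pvLstar cs + 1) 0 (Nat.zero_le _)
        (by have := (pv_Istar_hit cs hne).1; omega)]
    · have hgt : pvLstar cs < L + 1 := by omega
      have hnp : ¬ pvP cs (L + 1) := Nat.findGreatest_is_greatest hgt h2
      rw [pv_row_none cs (L + 1) hnp (cs.length - (L + 1) + 1) 0 (by omega)]
      exact ih (by omega) (by omega)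

theorem pv_B_eq (word : String) (hne : word.toList ≠ []) :
    find_max_substring_count_alt word
      = ((pvF word.toList : Int), String.ofList (pvW word.toList)) := by
  unfold find_max_substring_count_alt
  have hE : word.toList.isEmpty = false := by simpa using hne
  simp only [hE, Bool.false_eq_true, if_false]
  rw [show (PySem.List.max? (word.toList.map fun c => PySem.Chars.count word.toList [c]) id).getD 0
      = pvF word.toList from rfl]
  rw [pv_down_eq word.toList hne word.toList.length (pv_Lstar_le word.toList) le_rfl]

-- ---- A's double loop finds the canonical answer ----

theorem pv_cand_all (cs : List Char) (hne : cs ≠ []) (i j : Nat) (hij : i < j)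
    (hjn : j ≤ cs.length) :
    PySem.Chars.count cs (pvSub cs i (j - i)) ≤ PySem.Chars.count cs (pvW cs) ∧
      (PySem.Chars.count cs (pvSub cs i (j - i)) = PySem.Chars.count cs (pvW cs) →
        (pvSub cs i (j - i)).length ≤ (pvW cs).length) := by
  rw [pv_W_count cs hne, pv_W_length cs hne]
  have hi : i < cs.length := by omega
  constructor
  · exact pv_count_sub_le cs hne i (j - i) (by omega) hi
  · intro hf
    rw [pv_sub_length cs i (j - i) (by omega)]
    exact pv_le_Lstar cs i (j - i) (by omega) (by omega) hf

theorem pv_cand_pre (cs : List Char) (hne : cs ≠ []) (i j : Nat) (hij : i < j)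
    (hjn : j ≤ cs.length)
    (hbefore : i < pvIstar cs ∨ (i = pvIstar cs ∧ j < pvIstar cs + pvLstar cs)) :
    PySem.Chars.count cs (pvSub cs i (j - i)) < PySem.Chars.count cs (pvW cs) ∨
      (PySem.Chars.count cs (pvSub cs i (j - i)) = PySem.Chars.count cs (pvW cs) ∧
        (pvSub cs i (j - i)).length < (pvW cs).length) := by
  rw [pv_W_count cs hne, pv_W_length cs hne]
  have hi : i < cs.length := by omega
  have hle := pv_count_sub_le cs hne i (j - i) (by omega) hi
  by_cases hf : PySem.Chars.count cs (pvSub cs i (j - i)) = pvF cs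
  · right
    refine ⟨hf, ?_⟩
    rw [pv_sub_length cs i (j - i) (by omega)]
    have hLle := pv_le_Lstar cs i (j - i) (by omega) (by omega) hf
    rcases hbefore with hlt | ⟨rfl, hjlt⟩
    · rcases Nat.lt_or_ge (j - i) (pvLstar cs) with h | h
      · exact h
      · exfalso
        have hLeq : j - i = pvLstar cs := by omega
        apply pv_Istar_min cs hne i hlt
        refine ⟨by omega, ?_⟩
        rw [← hLeq]
        exact hf
    · omega
  · left
    omega

-- turn port A's nested pyRange folds into one fold over the candidate list
theorem pv_A_fold (cs : List Char) :
    pvAfold cs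
    = List.foldl (pvStep cs) ((0 : Int), ([] : List Char))
        ((List.range' 0 cs.length).flatMap fun i =>
          (List.range' (i + 1) (cs.length - i)).map fun j => pvSub cs i (j - i)) := by
  unfold pvAfold
  have h0 : PySem.List.pyRange 0 (cs.length : Int)
      = (List.range' 0 cs.length).map (Nat.cast : Nat → Int) := by
    have h := pv_pyRange_natCast cs.length 0
    rw [show (((0 : Nat) : Int)) = (0 : Int) from rfl] at h
    rw [show (0 + cs.length) = cs.length from by omega] at h
    exact h
  rw [h0, List.foldl_map (f := (Nat.cast : Nat → Int)), List.foldl_flatMap]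
  apply PySem.List.foldl_congr_mem
  intro acc i hi
  have hin : i < cs.length := by
    have := List.mem_range'_1.mp hi
    omega
  dsimp only
  have h1 : ((i : Nat) : Int) + 1 = ((i + 1 : Nat) : Int) := by omega
  have h2 : ((cs.length : Int) + 1) = (((i + 1) + (cs.length - i) : Nat) : Int) := by omega
  rw [h1, h2, pv_pyRange_natCast (cs.length - i) (i + 1),
    List.foldl_map (f := (Nat.cast : Nat → Int)), List.foldl_map]
  apply PySem.List.foldl_congr_mem
  intro acc' j hj
  dsimp only
  simp only [PySem.List.slice_natCast]
  rfl

-- the decomposition of the candidate list around the answer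
theorem pv_cand_split (cs : List Char) (hne : cs ≠ []) :
    ((List.range' 0 cs.length).flatMap fun i =>
        (List.range' (i + 1) (cs.length - i)).map fun j => pvSub cs i (j - i))
    = (((List.range' 0 (pvIstar cs)).flatMap fun i =>
          (List.range' (i + 1) (cs.length - i)).map fun j => pvSub cs i (j - i))
        ++ (List.range' (pvIstar cs + 1) (pvLstar cs - 1)).map
            (fun j => pvSub cs (pvIstar cs) (j - pvIstar cs)))
      ++ pvW cs ::
        (((List.range' (pvIstar cs + pvLstar cs + 1)
              (cs.length - pvIstar cs - pvLstar cs)).map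
            (fun j => pvSub cs (pvIstar cs) (j - pvIstar cs)))
          ++ ((List.range' (pvIstar cs + 1) (cs.length - pvIstar cs - 1)).flatMap fun i =>
            (List.range' (i + 1) (cs.length - i)).map fun j => pvSub cs i (j - i))) := by
  have hIL := pv_Istar_add_Lstar_le cs hne
  have hLpos := pv_Lstar_pos cs hne
  have hIn : pvIstar cs < cs.length := by omega
  have hsplit1 : List.range' 0 cs.length
      = List.range' 0 (pvIstar cs) ++ List.range' (pvIstar cs) (cs.length - pvIstar cs) := by
    have h := List.range'_append (s := 0) (m := pvIstar cs) (n := cs.length - pvIstar cs)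
      (step := 1)
    simp only [one_mul, Nat.zero_add] at h
    rw [show pvIstar cs + (cs.length - pvIstar cs) = cs.length from by omega] at h
    exact h.symm
  have hsplit2 : List.range' (pvIstar cs) (cs.length - pvIstar cs)
      = pvIstar cs :: List.range' (pvIstar cs + 1) (cs.length - pvIstar cs - 1) := by
    conv_lhs => rw [show cs.length - pvIstar cs = (cs.length - pvIstar cs - 1) + 1 from by omega]
    rw [List.range'_succ]
  have hrow : List.range' (pvIstar cs + 1) (cs.length - pvIstar cs)
      = List.range' (pvIstar cs + 1) (pvLstar cs - 1)
        ++ (pvIstar cs + pvLstar cs) ::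
          List.range' (pvIstar cs + pvLstar cs + 1) (cs.length - pvIstar cs - pvLstar cs) := by
    have h2 := List.range'_append (s := pvIstar cs + 1) (m := pvLstar cs - 1)
      (n := cs.length - pvIstar cs - (pvLstar cs - 1)) (step := 1)
    simp only [one_mul] at h2
    rw [show pvIstar cs + 1 + (pvLstar cs - 1) = pvIstar cs + pvLstar cs from by omega] at h2
    rw [show pvLstar cs - 1 + (cs.length - pvIstar cs - (pvLstar cs - 1))
        = cs.length - pvIstar cs from by omega] at h2
    have h3 : List.range' (pvIstar cs + pvLstar cs) (cs.length - pvIstar cs - (pvLstar cs - 1))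
        = (pvIstar cs + pvLstar cs)
          :: List.range' (pvIstar cs + pvLstar cs + 1) (cs.length - pvIstar cs - pvLstar cs) := by
      conv_lhs => rw [show cs.length - pvIstar cs - (pvLstar cs - 1)
          = (cs.length - pvIstar cs - pvLstar cs) + 1 from by omega]
      rw [List.range'_succ]
    rw [h3] at h2
    exact h2.symm
  rw [hsplit1, hsplit2, List.flatMap_append, List.flatMap_cons, hrow, List.map_append,
    List.map_cons]
  simp [pvW, List.append_assoc]

theorem pv_A_eq (word : String) (hne : word.toList ≠ []) :
    find_max_substring_count word
      = ((pvF word.toList : Int), String.ofList (pvW word.toList)) := by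
  have hfold : pvAfold word.toList
      = ((PySem.Chars.count word.toList (pvW word.toList) : Int), pvW word.toList) := by
    rw [pv_A_fold word.toList, pv_cand_split word.toList hne]
    apply pv_fold_first
    · rw [pv_W_count word.toList hne]
      exact pv_f_pos word.toList hne
    · intro s hs
      rcases List.mem_append.mp hs with hs | hs
      · obtain ⟨i, hi, hsi⟩ := List.mem_flatMap.mp hs
        obtain ⟨j, hj, rfl⟩ := List.mem_map.mp hsi
        have hi' := List.mem_range'_1.mp hi
        have hj' := List.mem_range'_1.mp hj
        exact pv_cand_pre word.toList hne i j (by omega) (by omega) (Or.inl (by omega))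
      · obtain ⟨j, hj, rfl⟩ := List.mem_map.mp hs
        have hj' := List.mem_range'_1.mp hj
        have hIL := pv_Istar_add_Lstar_le word.toList hne
        exact pv_cand_pre word.toList hne (pvIstar word.toList) j (by omega) (by omega)
          (Or.inr ⟨rfl, by omega⟩)
    · intro s hs
      rcases List.mem_append.mp hs with hs | hs
      · obtain ⟨j, hj, rfl⟩ := List.mem_map.mp hs
        have hj' := List.mem_range'_1.mp hj
        have hIL := pv_Istar_add_Lstar_le word.toList hne
        exact pv_cand_all word.toList hne (pvIstar word.toList) j (by omega) (by omega)
      · obtain ⟨i, hi, hsi⟩ := List.mem_flatMap.mp hs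
        obtain ⟨j, hj, rfl⟩ := List.mem_map.mp hsi
        have hi' := List.mem_range'_1.mp hi
        have hj' := List.mem_range'_1.mp hj
        exact pv_cand_all word.toList hne i j (by omega) (by omega)
  rw [pv_A_def, hfold, pv_W_count word.toList hne]

-- ===== VERDICT (by name: the statement is the Claim_ definition above) =====
theorem find_max_substring_count_spec : Claim_equal_find_max_substring_count := by
  intro word _
  unfold Spec_find_max_substring_count
  by_cases hne : word.toList = []
  · unfold find_max_substring_count find_max_substring_count_alt
    rw [hne]
    simp
  · rw [pv_A_eq word hne, pv_B_eq word hne]
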